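-- pv_equiv track=rewrite | github.com/fuera6/bioinformatics | source_code/gene_gathering.py | return_end
-- ===== SOURCE A (Python) =====
-- def return_end(location):
--     end=""
--     for s in location:
--         if s.isdigit():
--             end += s
--         elif s == ":":
--             end=""
--         elif s == "]":
--             return int(end)
-- ===== SOURCE B (Python) =====
-- def return_end(location):
--     head, sep, _ = location.partition(']')
--     if not sep:
--         return None
--     segment = head.rsplit(':', 1)[-1]
--     return int(''.join(c for c in segment if c.isdigit()))
-- ===== Notes on version B (the rewrite author's own statement) =====
-- stated objective: idiomatic
-- what changed: Replaces the char-by-char accumulator state machine (digit-append, colon-reset, early return at the bracket) with a partition/rsplit/filter string pipeline: split at the first closing bracket, take the piece after the last colon before it, keep its digits, convert once.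
import Mathlib
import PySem

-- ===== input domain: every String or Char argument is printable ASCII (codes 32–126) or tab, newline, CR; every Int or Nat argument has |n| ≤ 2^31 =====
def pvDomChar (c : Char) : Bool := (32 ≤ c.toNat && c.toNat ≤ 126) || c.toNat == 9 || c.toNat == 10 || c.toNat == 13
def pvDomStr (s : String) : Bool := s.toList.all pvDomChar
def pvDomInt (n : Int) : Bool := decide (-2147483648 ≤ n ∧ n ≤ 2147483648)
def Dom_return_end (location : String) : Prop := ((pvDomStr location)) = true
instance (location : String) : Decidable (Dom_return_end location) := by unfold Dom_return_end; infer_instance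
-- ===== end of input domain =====

-- B replaces A's char-by-char accumulator state machine with a partition/rsplit/filter
-- pipeline (objective: simpler/idiomatic; same behaviour, same exceptions).

-- ===== PORT A =====
-- the for-loop with the running string `end`; early return at ']'
def returnEndGo : List Char → List Char → Option Int
  | [], _ => none
  | c :: rest, acc =>
    if c.isDigit then returnEndGo rest (acc ++ [c])
    else if c = ':' then returnEndGo rest []
    else if c = ']' then PySem.Int.ofStr? (String.mk acc)   -- int(end); none = ValueError
    else returnEndGo rest acc

def return_end (location : String) : Option Int := returnEndGo location.toList []

-- ===== PORT B =====
-- head, sep, _ = location.partition(']'); head = chars before first ']', sep empty iff no ']'.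
-- head.rsplit(':', 1)[-1] = suffix of head after its last ':' — ported by hand (exact) as
-- reverse / takeWhile (· ≠ ':') / reverse.
def return_end_alt (location : String) : Option Int :=
  let cs := location.toList
  let head := cs.takeWhile (· ≠ ']')
  if ']' ∈ cs then
    let segment := (head.reverse.takeWhile (· ≠ ':')).reverse
    PySem.Int.ofStr? (String.mk (segment.filter Char.isDigit))  -- int(...); none = ValueError
  else none

-- ===== PRECONDITION & SPEC =====
-- Pre_ excludes exactly the inputs on which both Pythons raise ValueError (int('') in A,
-- int('') in B): a ']' is present but no digit occurs between it and the last ':' before it.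
def Pre_return_end (location : String) : Prop :=
  ']' ∈ location.toList →
    (((location.toList.takeWhile (· ≠ ']')).reverse.takeWhile (· ≠ ':')).any Char.isDigit) = true
instance (location : String) : Decidable (Pre_return_end location) := by
  unfold Pre_return_end; infer_instance
def pvWitness_return_end : String := "chr1:100-250]"
def Spec_return_end (location : String) (out : Option Int) : Prop := out = return_end_alt location
instance (location : String) (out : Option Int) : Decidable (Spec_return_end location out) := by unfold Spec_return_end; infer_instance

-- ===== CLAIM (what is proved, stated in full; the proofs are below) =====
def Claim_equal_return_end : Prop := ∀ (location : String), Dom_return_end location → Pre_return_end location → Spec_return_end location (return_end location)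

-- ===== LEMMAS AND PROOFS =====

theorem takeWhile_append_of_exists {α : Type} (p : α → Bool) (l₁ l₂ : List α)
    (h : ∃ x ∈ l₁, ¬ p x = true) : (l₁ ++ l₂).takeWhile p = l₁.takeWhile p := by
  induction l₁ with
  | nil => rcases h with ⟨x, hx, _⟩; cases hx
  | cons a t ih =>
    by_cases hp : p a = true
    · simp only [List.cons_append, List.takeWhile_cons, hp, if_true]
      rcases h with ⟨x, hx, hxp⟩
      rcases List.mem_cons.mp hx with rfl | hx'
      · exact absurd hp hxp
      · rw [ih ⟨x, hx', hxp⟩]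
    · simp [List.takeWhile_cons, hp]

theorem takeWhile_eq_self_of_all {α : Type} (p : α → Bool) (l : List α)
    (h : ∀ x ∈ l, p x = true) : l.takeWhile p = l := by
  induction l with
  | nil => rfl
  | cons a t ih =>
    simp [List.takeWhile_cons, h a (List.mem_cons_self), ih (fun x hx => h x (List.mem_cons_of_mem a hx))]

-- the digits A's loop has accumulated when it reaches the first ']'
def bdigits (l acc : List Char) : List Char :=
  let seg := l.takeWhile (· ≠ ']')
  (if ':' ∈ seg then [] else acc) ++ ((seg.reverse.takeWhile (· ≠ ':')).reverse.filter Char.isDigit)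

theorem takeWhile_append_of_all {α : Type} (p : α → Bool) (l₁ l₂ : List α)
    (h : ∀ x ∈ l₁, p x = true) : (l₁ ++ l₂).takeWhile p = l₁ ++ l₂.takeWhile p := by
  induction l₁ with
  | nil => rfl
  | cons a t ih =>
    simp [List.takeWhile_cons, h a (List.mem_cons_self),
      ih (fun x hx => h x (List.mem_cons_of_mem a hx))]

theorem returnEndGo_eq (l : List Char) : ∀ acc : List Char,
    returnEndGo l acc =
      if ']' ∈ l then PySem.Int.ofStr? (String.mk (bdigits l acc)) else none := by
  induction l with
  | nil => intro acc; simp [returnEndGo]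
  | cons c rest ih =>
    intro acc
    by_cases hbr : c = ']'
    · subst hbr
      simp [returnEndGo, bdigits, List.takeWhile_cons]
    · have hmem : (']' ∈ c :: rest) = (']' ∈ rest) := by
        simp [List.mem_cons, Ne.symm hbr]
      have hseg : (c :: rest).takeWhile (fun x => !decide (x = ']'))
          = c :: rest.takeWhile (fun x => !decide (x = ']')) := by
        simp [hbr]
      by_cases hcol : ':' ∈ rest.takeWhile (fun x => !decide (x = ']'))
      · have htw : ((rest.takeWhile (fun x => !decide (x = ']'))).reverse ++ [c]).takeWhile
            (fun x => !decide (x = ':'))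
            = (rest.takeWhile (fun x => !decide (x = ']'))).reverse.takeWhile
                (fun x => !decide (x = ':')) := by
          apply takeWhile_append_of_exists
          exact ⟨':', List.mem_reverse.mpr hcol, by simp⟩
        by_cases hd : c.isDigit
        · have hc : c ≠ ':' := by rintro rfl; simp at hd
          rw [show returnEndGo (c :: rest) acc = returnEndGo rest (acc ++ [c]) by
            simp [returnEndGo, hd], ih (acc ++ [c])]
          simp [bdigits, hseg, hmem, hcol, List.mem_cons, Ne.symm hc, htw]
        · by_cases hc : c = ':'
          · subst hc
            rw [show returnEndGo (':' :: rest) acc = returnEndGo rest [] by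
              simp [returnEndGo, hd], ih []]
            simp [bdigits, hseg, hmem, hcol, htw]
          · rw [show returnEndGo (c :: rest) acc = returnEndGo rest acc by
              simp [returnEndGo, hd, hc, hbr], ih acc]
            simp [bdigits, hseg, hmem, hcol, List.mem_cons, Ne.symm hc, htw]
      · have hall : ∀ x ∈ (rest.takeWhile (fun x => !decide (x = ']'))).reverse,
            (!decide (x = ':')) = true := by
          intro x hx
          simp only [List.mem_reverse] at hx
          simp only [Bool.not_eq_eq_eq_not, Bool.not_true, decide_eq_false_iff_not]
          exact fun h => hcol (h ▸ hx)
        have hsegRtw : (rest.takeWhile (fun x => !decide (x = ']'))).reverse.takeWhile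
            (fun x => !decide (x = ':'))
            = (rest.takeWhile (fun x => !decide (x = ']'))).reverse :=
          takeWhile_eq_self_of_all _ _ hall
        by_cases hd : c.isDigit
        · have hc : c ≠ ':' := by rintro rfl; simp at hd
          have htw : ((rest.takeWhile (fun x => !decide (x = ']'))).reverse ++ [c]).takeWhile
              (fun x => !decide (x = ':'))
              = (rest.takeWhile (fun x => !decide (x = ']'))).reverse ++ [c] := by
            apply takeWhile_eq_self_of_all
            intro x hx
            rcases List.mem_append.mp hx with h1 | h2
            · exact hall x h1
            · simp only [List.mem_singleton] at h2; subst h2; simp [hc]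
          rw [show returnEndGo (c :: rest) acc = returnEndGo rest (acc ++ [c]) by
            simp [returnEndGo, hd], ih (acc ++ [c])]
          simp [bdigits, hseg, hmem, hcol, List.mem_cons, Ne.symm hc, htw, hsegRtw, hd]
        · by_cases hc : c = ':'
          · subst hc
            have htw : ((rest.takeWhile (fun x => !decide (x = ']'))).reverse ++ [':']).takeWhile
                (fun x => !decide (x = ':'))
                = (rest.takeWhile (fun x => !decide (x = ']'))).reverse := by
              rw [takeWhile_append_of_all _ _ _ hall]; simp
            rw [show returnEndGo (':' :: rest) acc = returnEndGo rest [] by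
              simp [returnEndGo, hd], ih []]
            simp [bdigits, hseg, hmem, hcol, htw, hsegRtw]
          · have htw : ((rest.takeWhile (fun x => !decide (x = ']'))).reverse ++ [c]).takeWhile
                (fun x => !decide (x = ':'))
                = (rest.takeWhile (fun x => !decide (x = ']'))).reverse ++ [c] := by
              apply takeWhile_eq_self_of_all
              intro x hx
              rcases List.mem_append.mp hx with h1 | h2
              · exact hall x h1
              · simp only [List.mem_singleton] at h2; subst h2; simp [hc]
            rw [show returnEndGo (c :: rest) acc = returnEndGo rest acc by
              simp [returnEndGo, hd, hc, hbr], ih acc]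
            simp [bdigits, hseg, hmem, hcol, List.mem_cons, Ne.symm hc, htw, hsegRtw, hd]

-- ===== VERDICT (by name: the statement is the Claim_ definition above) =====
theorem return_end_spec : Claim_equal_return_end := by
  intro location _ _
  unfold Spec_return_end return_end return_end_alt
  rw [returnEndGo_eq]
  simp [bdigits]
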